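-- pv_equiv track=rewrite | github.com/omiguel144/loomi | LoomiScraper 4/attached_assets/main_1764442261601.py | infer_color_from_slug
-- ===== SOURCE A (Python) =====
-- COLOR_WORDS = ['black', 'white', 'red', 'blue', 'green', 'navy', 'olive', 'pink', 'grey', 'gray', 'brown', 'beige', 'tan', 'orange', 'yellow', 'purple', 'maroon', 'burgundy', 'cream', 'ivory', 'charcoal', 'teal', 'coral', 'mint', 'sage', 'lavender', 'plum', 'indigo', 'khaki', 'mustard', 'rust', 'wine', 'blush', 'nude', 'taupe', 'slate', 'mauve', 'turquoise', 'fuchsia', 'magenta', 'silver', 'gold', 'rose', 'sand', 'camel', 'mocha', 'espresso', 'chocolate', 'midnight', 'pewter']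
--
-- def infer_color_from_slug(style_slug):
--     """Try to infer a color name from style_slug if it starts with a common color word."""
--     if not style_slug:
--         return None
--
--     slug_lower = style_slug.lower()
--
--     for color in COLOR_WORDS:
--         # Check if slug starts with color word followed by hyphen
--         if slug_lower.startswith(f"{color}-"):
--             return color.capitalize()
--
--     return None
-- ===== SOURCE B (Python) =====
-- COLOR_WORDS = ['black', 'white', 'red', 'blue', 'green', 'navy', 'olive', 'pink', 'grey', 'gray', 'brown', 'beige', 'tan', 'orange', 'yellow', 'purple', 'maroon', 'burgundy', 'cream', 'ivory', 'charcoal', 'teal', 'coral', 'mint', 'sage', 'lavender', 'plum', 'indigo', 'khaki', 'mustard', 'rust', 'wine', 'blush', 'nude', 'taupe', 'slate', 'mauve', 'turquoise', 'fuchsia', 'magenta', 'silver', 'gold', 'rose', 'sand', 'camel', 'mocha', 'espresso', 'chocolate', 'midnight', 'pewter']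
--
-- COLOR_SET = set(COLOR_WORDS)
--
-- def infer_color_from_slug(style_slug):
--     """Try to infer a color name from style_slug if it starts with a common color word."""
--     if not style_slug:
--         return None
--     slug_lower = style_slug.lower()
--     if '-' not in slug_lower:
--         return None
--     prefix = slug_lower.split('-', 1)[0]
--     if prefix in COLOR_SET:
--         return prefix.capitalize()
--     return None
-- ===== Notes on version B (the rewrite author's own statement) =====
-- stated objective: idiomatic
-- what changed: Replaces the per-color startswith scan over COLOR_WORDS with a single prefix extraction (text before the first hyphen, guarded by a hyphen-presence check) plus one lookup in a precomputed set.
import Mathlib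
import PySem

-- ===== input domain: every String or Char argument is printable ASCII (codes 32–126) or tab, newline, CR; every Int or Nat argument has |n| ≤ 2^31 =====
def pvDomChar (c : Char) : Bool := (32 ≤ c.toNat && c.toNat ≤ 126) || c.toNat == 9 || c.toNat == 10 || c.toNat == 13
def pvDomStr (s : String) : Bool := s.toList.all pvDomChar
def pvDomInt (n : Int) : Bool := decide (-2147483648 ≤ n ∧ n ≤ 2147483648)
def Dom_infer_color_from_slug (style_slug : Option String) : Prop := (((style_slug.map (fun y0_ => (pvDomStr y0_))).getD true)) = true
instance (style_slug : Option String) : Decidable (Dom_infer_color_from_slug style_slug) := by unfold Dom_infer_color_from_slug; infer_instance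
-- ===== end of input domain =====

-- B replaces A's per-color startswith scan with one prefix extraction plus a set lookup (idiomatic).

-- ===== PORT A =====
def COLOR_WORDS : List String := ["black", "white", "red", "blue", "green", "navy", "olive", "pink", "grey", "gray", "brown", "beige", "tan", "orange", "yellow", "purple", "maroon", "burgundy", "cream", "ivory", "charcoal", "teal", "coral", "mint", "sage", "lavender", "plum", "indigo", "khaki", "mustard", "rust", "wine", "blush", "nude", "taupe", "slate", "mauve", "turquoise", "fuchsia", "magenta", "silver", "gold", "rose", "sand", "camel", "mocha", "espresso", "chocolate", "midnight", "pewter"]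

-- Python str.capitalize(): first char upper-cased, rest lower-cased (exact on ASCII)
def pyCapitalize (s : String) : String :=
  match s.toList with
  | [] => s
  | c :: rest => String.ofList (PySem.Chars.upperChar c :: PySem.Chars.lower rest)

-- the 'for color in COLOR_WORDS' loop of A
def colorLoopA (slug_lower : String) : List String → Option String
  | [] => none
  | c :: cs =>
      if PySem.Str.startswith slug_lower (c ++ "-") then some (pyCapitalize c)
      else colorLoopA slug_lower cs

def infer_color_from_slug (style_slug : Option String) : Option String :=
  match style_slug with
  | none => none
  | some s =>
      if s = "" then none
      else colorLoopA (PySem.Str.lower s) COLOR_WORDS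

-- ===== PORT B =====
def COLOR_SET : PySem.Set String := PySem.Set.ofList COLOR_WORDS

def infer_color_from_slug_alt (style_slug : Option String) : Option String :=
  match style_slug with
  | none => none
  | some s =>
      if s = "" then none
      else
        if PySem.Str.isIn "-" (PySem.Str.lower s) then
          -- slug_lower.split('-', 1)[0] = the text before the first hyphen
          if PySem.Set.contains COLOR_SET (String.ofList ((PySem.Str.lower s).toList.takeWhile (· ≠ '-')))
          then some (pyCapitalize (String.ofList ((PySem.Str.lower s).toList.takeWhile (· ≠ '-'))))
          else none
        else none

-- ===== PRECONDITION & SPEC =====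
def Spec_infer_color_from_slug (style_slug : Option String) (out : Option String) : Prop := out = infer_color_from_slug_alt style_slug
instance (style_slug : Option String) (out : Option String) : Decidable (Spec_infer_color_from_slug style_slug out) := by unfold Spec_infer_color_from_slug; infer_instance

-- ===== CLAIM (what is proved, stated in full; the proofs are below) =====
def Claim_equal_infer_color_from_slug : Prop := ∀ (style_slug : Option String), Dom_infer_color_from_slug style_slug → Spec_infer_color_from_slug style_slug (infer_color_from_slug style_slug)

-- ===== LEMMAS AND PROOFS =====

-- (p ++ ['-']) is a prefix of L  ↔  L contains '-' and its pre-hyphen prefix is p  (for hyphen-free p)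
lemma prefix_hyphen_iff (p L : List Char) (hp : '-' ∉ p) :
    (p ++ ['-']) <+: L ↔ ('-' ∈ L ∧ L.takeWhile (· ≠ '-') = p) := by
  constructor
  · rintro ⟨t, rfl⟩
    refine ⟨by simp, ?_⟩
    have hall : p.takeWhile (· ≠ '-') = p :=
      List.takeWhile_eq_self_iff.mpr (fun a ha => by simp; rintro rfl; exact hp ha)
    rw [List.append_assoc, List.takeWhile_append, if_pos (by rw [hall])]
    simp
  · rintro ⟨hmem, htw⟩
    have hd : L.dropWhile (· ≠ '-') ≠ [] := by
      intro hnil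
      have hLp : L = p := by
        conv_lhs => rw [← List.takeWhile_append_dropWhile (p := (· ≠ '-')) (l := L)]
        rw [htw, hnil, List.append_nil]
      exact hp (hLp ▸ hmem)
    obtain ⟨c', t, hct⟩ := List.exists_cons_of_ne_nil hd
    have hc' : c' = '-' := by
      have h1 := List.head_dropWhile_not (p := (· ≠ '-')) (l := L) hd
      have h2 : (L.dropWhile (· ≠ '-')).head hd = c' := by simp only [hct, List.head_cons]
      rw [h2] at h1; simpa using h1
    refine ⟨t, ?_⟩
    conv_rhs => rw [← List.takeWhile_append_dropWhile (p := (· ≠ '-')) (l := L)]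
    rw [htw, hct, hc']
    simp

-- A's scan returns capitalize(prefix) iff the pre-hyphen prefix is one of the scanned words
lemma colorLoopA_eq (sl : String) (cs : List String) (hnd : ∀ c ∈ cs, '-' ∉ c.toList) :
    colorLoopA sl cs =
      if '-' ∈ sl.toList then
        (if String.ofList (sl.toList.takeWhile (· ≠ '-')) ∈ cs
         then some (pyCapitalize (String.ofList (sl.toList.takeWhile (· ≠ '-')))) else none)
      else none := by
  induction cs with
  | nil => by_cases h : '-' ∈ sl.toList <;> simp [colorLoopA, h]
  | cons c cs ih =>
    have hc : '-' ∉ c.toList := hnd c (by simp)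
    have hstart : PySem.Str.startswith sl (c ++ "-") = true ↔
        ('-' ∈ sl.toList ∧ sl.toList.takeWhile (· ≠ '-') = c.toList) := by
      rw [PySem.Str.startswith_eq, PySem.Chars.startswith_iff]
      simpa using prefix_hyphen_iff c.toList sl.toList hc
    have ih' := ih (fun x hx => hnd x (List.mem_cons.mpr (Or.inr hx)))
    by_cases hmem : '-' ∈ sl.toList
    · by_cases heq : sl.toList.takeWhile (· ≠ '-') = c.toList
      · have hmk : String.ofList (sl.toList.takeWhile (· ≠ '-')) = c := by
          rw [heq]; simp
        show (if PySem.Str.startswith sl (c ++ "-") = true then some (pyCapitalize c)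
              else colorLoopA sl cs) = _
        rw [if_pos (hstart.mpr ⟨hmem, heq⟩), if_pos hmem,
            if_pos (hmk ▸ List.mem_cons_self), hmk]
      · have hne : String.ofList (sl.toList.takeWhile (· ≠ '-')) ≠ c := by
          intro h; apply heq
          have := congrArg String.toList h
          simpa using this
        show (if PySem.Str.startswith sl (c ++ "-") = true then some (pyCapitalize c)
              else colorLoopA sl cs) = _
        rw [if_neg (by rw [hstart]; rintro ⟨_, h⟩; exact heq h), ih', if_pos hmem, if_pos hmem]
        by_cases hin : String.ofList (sl.toList.takeWhile (· ≠ '-')) ∈ cs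
        · rw [if_pos hin, if_pos (List.mem_cons.mpr (Or.inr hin))]
        · rw [if_neg hin, if_neg (by
            rw [List.mem_cons]; rintro (h | h); exacts [hne h, hin h])]
    · show (if PySem.Str.startswith sl (c ++ "-") = true then some (pyCapitalize c)
            else colorLoopA sl cs) = _
      rw [if_neg (by rw [hstart]; rintro ⟨h, _⟩; exact hmem h), ih', if_neg hmem, if_neg hmem]

lemma colorwords_hyphen_free : ∀ c ∈ COLOR_WORDS, '-' ∉ c.toList := by decide

-- ===== VERDICT (by name: the statement is the Claim_ definition above) =====
theorem infer_color_from_slug_spec : Claim_equal_infer_color_from_slug := by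
  intro style_slug _
  unfold Spec_infer_color_from_slug
  match style_slug with
  | none => rfl
  | some s =>
    by_cases hs : s = ""
    · simp [infer_color_from_slug, infer_color_from_slug_alt, hs]
    · show (if s = "" then none else colorLoopA (PySem.Str.lower s) COLOR_WORDS) =
        (if s = "" then none else _)
      rw [if_neg hs, if_neg hs, colorLoopA_eq _ _ colorwords_hyphen_free]
      have hisin : PySem.Str.isIn "-" (PySem.Str.lower s) = true ↔
          '-' ∈ (PySem.Str.lower s).toList := by
        rw [PySem.Str.isIn_iff_infix]
        constructor
        · intro h
          exact h.mem (by decide)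
        · intro h
          obtain ⟨l1, l2, hL⟩ := List.append_of_mem h
          exact ⟨l1, l2, by rw [hL]; simp⟩
      have hcontains : PySem.Set.contains COLOR_SET
          (String.ofList ((PySem.Str.lower s).toList.takeWhile (· ≠ '-'))) = true ↔
          String.ofList ((PySem.Str.lower s).toList.takeWhile (· ≠ '-')) ∈ COLOR_WORDS := by
        rw [PySem.Set.contains_iff]
        exact PySem.Set.mem_ofList ..
      by_cases hmem : '-' ∈ (PySem.Str.lower s).toList
      · rw [if_pos hmem, if_pos (hisin.mpr hmem)]
        by_cases hin : String.ofList ((PySem.Str.lower s).toList.takeWhile (· ≠ '-')) ∈ COLOR_WORDS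
        · rw [if_pos hin, if_pos (hcontains.mpr hin)]
        · rw [if_neg hin, if_neg (fun h => hin (hcontains.mp h))]
      · rw [if_neg hmem, if_neg (fun h => hmem (hisin.mp h))]
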